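-- pv_equiv track=rewrite | github.com/ppurinnn/othello2025 | __init__.py | count_stable_stones
-- ===== SOURCE A (Python) =====
-- def count_stable_stones(board, color):
--     """確定石の数をカウント"""
--     size = len(board)
--     count = 0
--
--     for row in range(size):
--         for col in range(size):
--             if board[row][col] == color:
--                 if is_stable(board, row, col, color, size):
--                     count += 1
--
--     return count
--
-- def is_stable(board, row, col, color, size):
--     """石が確定石か判定"""
--     directions = [(-1,-1), (-1,0), (-1,1), (0,-1), (0,1), (1,-1), (1,0), (1,1)]
--     opponent = 3 - color
--
--     for dr, dc in directions:
--         nr, nc = row + dr, col + dc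
--
--         while 0 <= nr < size and 0 <= nc < size:
--             if board[nr][nc] == 0:
--                 return False
--             elif board[nr][nc] == opponent:
--                 return False
--             nr += dr
--             nc += dc
--
--     return True
-- ===== SOURCE B (Python) =====
-- def count_stable_stones(board, color):
--     """Count stable stones via per-direction DP sweeps instead of per-cell ray walks."""
--     size = len(board)
--     opponent = 3 - color
--     grid = [row[:size] for row in board]
--     open_ = [[x != 0 and x != opponent for x in row] for row in grid]
--
--     def shift(row, dc):
--         # read each position's neighbour's value in column direction dc; off-board is safe
--         if dc < 0:
--             return [True] + row[:-1]
--         if dc > 0: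
--             return row[1:] + [True]
--         return list(row)
--
--     def sweep(rows, dc):
--         # direction dr = -1 w.r.t. the given row order:
--         # stab[r][c] = the (dr,dc)-neighbour of (r,c) is off-board
--         #              or its whole ray to the edge is free of 0/opponent cells
--         stab, prev = [], [True] * size
--         for row in rows:
--             cur = shift(prev, dc)
--             stab.append(cur)
--             prev = [a and b for a, b in zip(row, cur)]
--         return stab
--
--     def sweep_row(row, dc):
--         # direction dr = 0, scanning a single row
--         stab, prev = [True] * size, True
--         for c in (range(size) if dc < 0 else range(size - 1, -1, -1)):
--             stab[c] = prev
--             prev = row[c] and prev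
--         return stab
--
--     stabs = [sweep(open_, dc) for dc in (-1, 0, 1)]
--     stabs += [list(reversed(sweep(list(reversed(open_)), dc))) for dc in (-1, 0, 1)]
--     stabs += [[sweep_row(row, dc) for row in open_] for dc in (-1, 1)]
--
--     return sum(1 for r in range(size) for c in range(size)
--                if grid[r][c] == color and all(g[r][c] for g in stabs))
-- ===== Notes on version B (the rewrite author's own statement) =====
-- stated objective: alternative
-- what changed: Replaced the per-cell 8-direction ray walk by eight per-direction dynamic-programming sweeps that compute 'ray to the edge is free of empty/opponent cells' for every cell at once, then count cells of the colour whose eight neighbour-rays are all clear.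
import Mathlib
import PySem

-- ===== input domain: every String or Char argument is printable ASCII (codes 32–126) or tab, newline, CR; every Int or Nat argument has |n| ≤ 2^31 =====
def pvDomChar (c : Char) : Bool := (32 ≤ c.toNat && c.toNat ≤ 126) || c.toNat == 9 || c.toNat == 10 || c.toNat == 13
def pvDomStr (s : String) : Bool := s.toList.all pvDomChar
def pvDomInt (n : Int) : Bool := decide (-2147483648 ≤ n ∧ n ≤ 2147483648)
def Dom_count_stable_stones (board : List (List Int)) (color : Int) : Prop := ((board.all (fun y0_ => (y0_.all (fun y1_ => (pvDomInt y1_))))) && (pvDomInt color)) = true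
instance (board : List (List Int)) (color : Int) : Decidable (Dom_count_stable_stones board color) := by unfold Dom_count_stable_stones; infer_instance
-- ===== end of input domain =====

-- B replaces A's per-cell 8-direction ray walks by eight per-direction DP sweeps over the board (alternative algorithm).

-- ===== PORT A =====
-- board[r][c]; only evaluated at indices Pre_ keeps in range
def pvCell (board : List (List Int)) (r c : Int) : Int :=
  PySem.List.pyGetD (PySem.List.pyGetD board r []) c 0

-- the 'while 0 <= nr < size and 0 <= nc < size' walk of is_stable; fuel size+1 exceeds the
-- at most size in-bounds steps the walk can make (one coordinate moves by ±1 every step)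
def pvStepLoop (board : List (List Int)) (size opponent dr dc : Int) :
    Nat → Int → Int → Bool
  | 0, _, _ => true
  | fuel+1, nr, nc =>
    if 0 ≤ nr ∧ nr < size ∧ 0 ≤ nc ∧ nc < size then
      if pvCell board nr nc = 0 then false
      else if pvCell board nr nc = opponent then false
      else pvStepLoop board size opponent dr dc fuel (nr+dr) (nc+dc)
    else true

def pvIsStable (board : List (List Int)) (row col color size : Int) : Bool :=
  ([(-1,-1), (-1,0), (-1,1), (0,-1), (0,1), (1,-1), (1,0), (1,1)] : List (Int × Int)).all
    (fun d => pvStepLoop board size (3 - color) d.1 d.2 (size.toNat + 1) (row + d.1) (col + d.2))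

def count_stable_stones (board : List (List Int)) (color : Int) : Int :=
  let size : Int := PySem.List.len board
  (PySem.List.pyRange 0 size 1).foldl (fun count row =>
    (PySem.List.pyRange 0 size 1).foldl (fun count col =>
      if pvCell board row col = color then
        if pvIsStable board row col color size then count + 1 else count
      else count) count) 0

-- ===== PORT B =====
-- shift(row, dc) of Source B
def altShift (row : List Bool) (dc : Int) : List Bool :=
  if dc < 0 then true :: PySem.List.slice row none (some (-1))
  else if 0 < dc then PySem.List.slice row (some 1) none ++ [true]
  else row

-- sweep(rows, dc) of Source B: fold carrying (stab, prev)
def altSweep (rows : List (List Bool)) (n : Nat) (dc : Int) : List (List Bool) :=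
  (rows.foldl (fun (st : List (List Bool) × List Bool) row =>
      let cur := altShift st.2 dc
      (st.1 ++ [cur], List.zipWith (fun a b => a && b) row cur))
    ([], List.replicate n true)).1

-- sweep_row(row, dc) of Source B
def altSweepRow (row : List Bool) (n : Nat) (dc : Int) : List Bool :=
  ((if dc < 0 then PySem.List.pyRange 0 (n : Int) 1
    else PySem.List.pyRange ((n : Int) - 1) (-1) (-1)).foldl
    (fun (st : List Bool × Bool) c =>
      (PySem.List.pySetD st.1 c st.2, PySem.List.pyGetD row c false && st.2))
    (List.replicate n true, true)).1

def count_stable_stones_alt (board : List (List Int)) (color : Int) : Int :=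
  let n : Nat := board.length
  let size : Int := PySem.List.len board
  let opponent : Int := 3 - color
  let grid : List (List Int) := board.map (fun row => PySem.List.slice row none (some size))
  let opn : List (List Bool) :=
    grid.map (fun row => row.map (fun x => decide (x ≠ 0) && decide (x ≠ opponent)))
  let stabs : List (List (List Bool)) :=
    (([-1, 0, 1] : List Int).map (fun dc => altSweep opn n dc)) ++
    (([-1, 0, 1] : List Int).map (fun dc => (altSweep opn.reverse n dc).reverse)) ++
    (([-1, 1] : List Int).map (fun dc => opn.map (fun row => altSweepRow row n dc)))
  (PySem.List.pyRange 0 size 1).foldl (fun s r =>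
    (PySem.List.pyRange 0 size 1).foldl (fun s c =>
      if PySem.List.pyGetD (PySem.List.pyGetD grid r []) c 0 = color ∧
         stabs.all (fun g => PySem.List.pyGetD (PySem.List.pyGetD g r []) c false) then
        s + 1
      else s) s) 0

-- ===== PRECONDITION & SPEC =====
-- Pre_ excludes exactly the boards with a row shorter than len(board): there A raises IndexError
-- (board[row][col] for col in range(size)), and B raises too.
def Pre_count_stable_stones (board : List (List Int)) (color : Int) : Prop :=
  ∀ row ∈ board, board.length ≤ row.length
instance (board : List (List Int)) (color : Int) : Decidable (Pre_count_stable_stones board color) := by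
  unfold Pre_count_stable_stones; infer_instance

def pvWitness_count_stable_stones : List (List Int) × Int := ([[1, 2], [0, 1]], 1)

def Spec_count_stable_stones (board : List (List Int)) (color : Int) (out : Int) : Prop := out = count_stable_stones_alt board color
instance (board : List (List Int)) (color : Int) (out : Int) : Decidable (Spec_count_stable_stones board color out) := by unfold Spec_count_stable_stones; infer_instance

-- ===== CLAIM (what is proved, stated in full; the proofs are below) =====
def Claim_equal_count_stable_stones : Prop := ∀ (board : List (List Int)) (color : Int), Dom_count_stable_stones board color → Pre_count_stable_stones board color → Spec_count_stable_stones board color (count_stable_stones board color)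

-- ===== LEMMAS AND PROOFS =====

-- entry (r,c) of a Bool grid, false off the lists
def gget (g : List (List Bool)) (r c : Int) : Bool :=
  (g.getD r.toNat []).getD c.toNat false

-- ray walks over a Bool grid, one per direction class, fuel-free (spec for both ports)
def vloop (g : List (List Bool)) (n : Nat) (dc : Int) (nr nc : Int) : Bool :=
  if 0 ≤ nr ∧ nr < (n : Int) ∧ 0 ≤ nc ∧ nc < (n : Int) then
    gget g nr nc && vloop g n dc (nr - 1) (nc + dc)
  else true
termination_by (nr + 1).toNat
decreasing_by omega

def dloop (g : List (List Bool)) (n : Nat) (dc : Int) (nr nc : Int) : Bool :=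
  if 0 ≤ nr ∧ nr < (n : Int) ∧ 0 ≤ nc ∧ nc < (n : Int) then
    gget g nr nc && dloop g n dc (nr + 1) (nc + dc)
  else true
termination_by ((n : Int) - nr).toNat
decreasing_by omega

def hloopL (row : List Bool) (n : Nat) (nc : Int) : Bool :=
  if 0 ≤ nc ∧ nc < (n : Int) then row.getD nc.toNat false && hloopL row n (nc - 1)
  else true
termination_by (nc + 1).toNat
decreasing_by omega

def hloopR (row : List Bool) (n : Nat) (nc : Int) : Bool :=
  if 0 ≤ nc ∧ nc < (n : Int) then row.getD nc.toNat false && hloopR row n (nc + 1)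
  else true
termination_by ((n : Int) - nc).toNat
decreasing_by omega


-- the open-cell grid both ports effectively work over (B's `opn` with opp = 3 - color)
def openG (board : List (List Int)) (opp : Int) : List (List Bool) :=
  board.map (fun row => (PySem.List.slice row none (some (PySem.List.len board))).map
    (fun x => decide (x ≠ 0) && decide (x ≠ opp)))

-- ---- dimensions ----
lemma openG_length (board : List (List Int)) (opp : Int) :
    (openG board opp).length = board.length := by
  simp [openG]

lemma openG_row_length (board : List (List Int)) (opp : Int)
    (hPre : ∀ row ∈ board, board.length ≤ row.length) (row : List Bool)
    (hrow : row ∈ openG board opp) : row.length = board.length := by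
  simp only [openG, List.mem_map] at hrow
  obtain ⟨row0, h0, rfl⟩ := hrow
  have := hPre row0 h0
  simp [PySem.List.len_eq, PySem.List.slice_to_natCast]
  omega

-- ---- cells ----
lemma gget_openG (board : List (List Int)) (opp : Int)
    (hPre : ∀ row ∈ board, board.length ≤ row.length) (r c : Int)
    (hr : 0 ≤ r ∧ r < (board.length : Int)) (hc : 0 ≤ c ∧ c < (board.length : Int)) :
    gget (openG board opp) r c
      = (decide (pvCell board r c ≠ 0) && decide (pvCell board r c ≠ opp)) := by
  have hr' : r.toNat < board.length := by omega
  have hrowlen : board.length ≤ (board[r.toNat]'hr').length := hPre _ (List.getElem_mem hr')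
  have hc' : c.toNat < (board[r.toNat]'hr').length := by omega
  rw [gget, List.getD_eq_getElem _ [] (by rw [openG_length]; exact hr')]
  simp only [openG, List.getElem_map, PySem.List.len_eq, PySem.List.slice_to_natCast]
  rw [List.getD_eq_getElem _ false (by simp [List.length_take]; omega)]
  simp only [List.getElem_map, List.getElem_take]
  rw [pvCell, PySem.List.pyGetD_eq_getElem _ _ hr.1 (by simpa using hr.2),
    PySem.List.pyGetD_eq_getElem _ _ hc.1 (by omega)]

-- ---- A's walk equals the fuel-free spec walks over openG ----
lemma pvStep_up (board : List (List Int)) (opp dc : Int)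
    (hPre : ∀ row ∈ board, board.length ≤ row.length) :
    ∀ (fuel : Nat) (nr nc : Int), (nr + 1).toNat ≤ fuel →
      pvStepLoop board (board.length : Int) opp (-1) dc fuel nr nc
        = vloop (openG board opp) board.length dc nr nc := by
  intro fuel
  induction fuel with
  | zero =>
    intro nr nc h
    rw [pvStepLoop, vloop, if_neg (by omega)]
  | succ f ih =>
    intro nr nc h
    rw [pvStepLoop, vloop]
    by_cases hb : 0 ≤ nr ∧ nr < (board.length : Int) ∧ 0 ≤ nc ∧ nc < (board.length : Int)
    · rw [if_pos hb, if_pos hb,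
        gget_openG board opp hPre nr nc ⟨hb.1, hb.2.1⟩ ⟨hb.2.2.1, hb.2.2.2⟩]
      by_cases h0 : pvCell board nr nc = 0
      · simp [h0]
      · by_cases hop : pvCell board nr nc = opp
        · simp [hop]
        · rw [if_neg h0, if_neg hop, show nr + -1 = nr - 1 by ring,
            ih (nr - 1) (nc + dc) (by omega)]
          simp [h0, hop]
    · rw [if_neg hb, if_neg hb]

lemma pvStep_down (board : List (List Int)) (opp dc : Int)
    (hPre : ∀ row ∈ board, board.length ≤ row.length) :
    ∀ (fuel : Nat) (nr nc : Int), ((board.length : Int) - nr).toNat ≤ fuel →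
      pvStepLoop board (board.length : Int) opp 1 dc fuel nr nc
        = dloop (openG board opp) board.length dc nr nc := by
  intro fuel
  induction fuel with
  | zero =>
    intro nr nc h
    rw [pvStepLoop, dloop, if_neg (by omega)]
  | succ f ih =>
    intro nr nc h
    rw [pvStepLoop, dloop]
    by_cases hb : 0 ≤ nr ∧ nr < (board.length : Int) ∧ 0 ≤ nc ∧ nc < (board.length : Int)
    · rw [if_pos hb, if_pos hb,
        gget_openG board opp hPre nr nc ⟨hb.1, hb.2.1⟩ ⟨hb.2.2.1, hb.2.2.2⟩]
      by_cases h0 : pvCell board nr nc = 0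
      · simp [h0]
      · by_cases hop : pvCell board nr nc = opp
        · simp [hop]
        · rw [if_neg h0, if_neg hop, ih (nr + 1) (nc + dc) (by omega)]
          simp [h0, hop]
    · rw [if_neg hb, if_neg hb]

lemma pvStep_left (board : List (List Int)) (opp : Int)
    (hPre : ∀ row ∈ board, board.length ≤ row.length) (r : Int)
    (hr : 0 ≤ r ∧ r < (board.length : Int)) :
    ∀ (fuel : Nat) (nc : Int), (nc + 1).toNat ≤ fuel →
      pvStepLoop board (board.length : Int) opp 0 (-1) fuel r nc
        = hloopL ((openG board opp).getD r.toNat []) board.length nc := by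
  intro fuel
  induction fuel with
  | zero =>
    intro nc h
    rw [pvStepLoop, hloopL, if_neg (by omega)]
  | succ f ih =>
    intro nc h
    rw [pvStepLoop, hloopL]
    by_cases hb : 0 ≤ nc ∧ nc < (board.length : Int)
    · rw [if_pos ⟨hr.1, hr.2, hb⟩, if_pos hb]
      have hg : ((openG board opp).getD r.toNat []).getD nc.toNat false
          = gget (openG board opp) r nc := rfl
      rw [hg, gget_openG board opp hPre r nc hr hb]
      by_cases h0 : pvCell board r nc = 0
      · simp [h0]
      · by_cases hop : pvCell board r nc = opp
        · simp [hop]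
        · rw [if_neg h0, if_neg hop, show r + 0 = r by ring,
            show nc + -1 = nc - 1 by ring, ih (nc - 1) (by omega)]
          simp [h0, hop]
    · rw [if_neg (by tauto), if_neg hb]

lemma pvStep_right (board : List (List Int)) (opp : Int)
    (hPre : ∀ row ∈ board, board.length ≤ row.length) (r : Int)
    (hr : 0 ≤ r ∧ r < (board.length : Int)) :
    ∀ (fuel : Nat) (nc : Int), ((board.length : Int) - nc).toNat ≤ fuel →
      pvStepLoop board (board.length : Int) opp 0 1 fuel r nc
        = hloopR ((openG board opp).getD r.toNat []) board.length nc := by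
  intro fuel
  induction fuel with
  | zero =>
    intro nc h
    rw [pvStepLoop, hloopR, if_neg (by omega)]
  | succ f ih =>
    intro nc h
    rw [pvStepLoop, hloopR]
    by_cases hb : 0 ≤ nc ∧ nc < (board.length : Int)
    · rw [if_pos ⟨hr.1, hr.2, hb⟩, if_pos hb]
      have hg : ((openG board opp).getD r.toNat []).getD nc.toNat false
          = gget (openG board opp) r nc := rfl
      rw [hg, gget_openG board opp hPre r nc hr hb]
      by_cases h0 : pvCell board r nc = 0
      · simp [h0]
      · by_cases hop : pvCell board r nc = opp
        · simp [hop]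
        · rw [if_neg h0, if_neg hop, show r + 0 = r by ring, ih (nc + 1) (by omega)]
          simp [h0, hop]
    · rw [if_neg (by tauto), if_neg hb]

-- ---- B's vertical sweep ----
-- recursive views of the fold in altSweep
def prevL (dc : Int) : List (List Bool) → List Bool → List Bool
  | [], prev => prev
  | row :: rest, prev => prevL dc rest (List.zipWith (fun a b => a && b) row (altShift prev dc))

def stabL (dc : Int) : List (List Bool) → List Bool → List (List Bool)
  | [], _ => []
  | row :: rest, prev =>
      altShift prev dc :: stabL dc rest (List.zipWith (fun a b => a && b) row (altShift prev dc))

lemma sweep_fold (dc : Int) :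
    ∀ (rows : List (List Bool)) (acc : List (List Bool)) (prev : List Bool),
      (rows.foldl (fun (st : List (List Bool) × List Bool) row =>
        let cur := altShift st.2 dc
        (st.1 ++ [cur], List.zipWith (fun a b => a && b) row cur)) (acc, prev))
      = (acc ++ stabL dc rows prev, prevL dc rows prev) := by
  intro rows
  induction rows with
  | nil => intro acc prev; simp [stabL, prevL]
  | cons row rest ih =>
    intro acc prev
    simp only [List.foldl_cons, stabL, prevL]
    rw [ih]
    simp

lemma altSweep_eq_stabL (rows : List (List Bool)) (n : Nat) (dc : Int) :
    altSweep rows n dc = stabL dc rows (List.replicate n true) := by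
  rw [altSweep, sweep_fold]
  simp

lemma stabL_length (dc : Int) (rows : List (List Bool)) (prev : List Bool) :
    (stabL dc rows prev).length = rows.length := by
  induction rows generalizing prev with
  | nil => simp [stabL]
  | cons row rest ih => simp [stabL, ih]

lemma prevL_append (dc : Int) (xs : List (List Bool)) (row : List Bool) (prev : List Bool) :
    prevL dc (xs ++ [row]) prev
      = List.zipWith (fun a b => a && b) row (altShift (prevL dc xs prev) dc) := by
  induction xs generalizing prev with
  | nil => simp [prevL]
  | cons x rest ih => simp [prevL, ih]

lemma stabL_getD (dc : Int) (rows : List (List Bool)) (prev : List Bool) (r : Nat)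
    (hr : r < rows.length) :
    (stabL dc rows prev).getD r [] = altShift (prevL dc (rows.take r) prev) dc := by
  induction rows generalizing prev r with
  | nil => simp at hr
  | cons row rest ih =>
    cases r with
    | zero => simp [stabL, prevL]
    | succ k =>
      simp only [stabL, List.getD_cons_succ, List.take_succ_cons, prevL]
      exact ih _ k (by simpa using hr)

lemma altShift_length (p : List Bool) (n : Nat) (hp : p.length = n) (hn : 0 < n) (dc : Int) :
    (altShift p dc).length = n := by
  by_cases h1 : dc < 0
  · simp [altShift, h1, PySem.List.slice_to_neg_one]
    omega
  · by_cases h2 : 0 < dc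
    · simp [altShift, h1, h2, PySem.List.slice_from_one]
      omega
    · simp [altShift, h1, h2, hp]

lemma altShift_getD (p : List Bool) (n : Nat) (hp : p.length = n) (dc : Int)
    (hdc : dc = -1 ∨ dc = 0 ∨ dc = 1) (c : Nat) (hc : c < n) :
    (altShift p dc).getD c false
      = if 0 ≤ (c : Int) + dc ∧ (c : Int) + dc < (n : Int)
        then p.getD ((c : Int) + dc).toNat false else true := by
  rcases hdc with rfl | rfl | rfl
  · rw [show altShift p (-1) = true :: p.dropLast by
      simp [altShift, PySem.List.slice_to_neg_one]]
    cases c with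
    | zero => norm_num
    | succ k =>
      rw [if_pos (by constructor <;> omega)]
      have h1 : k < p.dropLast.length := by simp [List.length_dropLast]; omega
      have h2 : ((k + 1 : Nat) : Int) + -1 = ((k : Nat) : Int) := by push_cast; ring
      rw [h2, List.getD_cons_succ, List.getD_eq_getElem _ _ h1,
        List.getD_eq_getElem _ _ (by omega : (((k : Nat) : Int)).toNat < p.length)]
      simp [List.getElem_dropLast]
  · rw [show altShift p 0 = p by simp [altShift]]
    rw [if_pos (by constructor <;> omega)]
    simp
  · rw [show altShift p 1 = p.tail ++ [true] by
      simp [altShift, PySem.List.slice_from_one]]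
    by_cases hlast : c + 1 < n
    · rw [if_pos (by constructor <;> omega)]
      have h1 : c < p.tail.length := by simp [List.length_tail]; omega
      rw [List.getD_append _ _ _ _ h1, List.getD_eq_getElem _ _ h1,
        List.getD_eq_getElem _ _ (by omega : (((c : Nat) : Int) + 1).toNat < p.length)]
      have : (((c : Nat) : Int) + 1).toNat = c + 1 := by omega
      simp [List.getElem_tail, this]
    · rw [if_neg (by omega)]
      have hc1 : c = n - 1 := by omega
      have h1 : p.tail.length = c := by simp [List.length_tail]; omega
      rw [show c = p.tail.length + 0 by omega]
      simp

-- the central DP invariant: after k rows, prev is the "all-open ray up from row k-1" row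
lemma prevL_invariant (g : List (List Bool)) (n : Nat) (hg : g.length = n)
    (hrows : ∀ row ∈ g, row.length = n) (dc : Int) (hdc : dc = -1 ∨ dc = 0 ∨ dc = 1) :
    ∀ (k : Nat), k ≤ n →
      (prevL dc (g.take k) (List.replicate n true)).length = n ∧
      ∀ (c : Nat), c < n →
        (prevL dc (g.take k) (List.replicate n true)).getD c false
          = vloop g n dc ((k : Int) - 1) (c : Int) := by
  intro k
  induction k with
  | zero =>
    intro hk
    refine ⟨by simp [prevL], fun c hc => ?_⟩
    rw [vloop, if_neg (by omega)]
    simp [prevL, hc]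
  | succ k ih =>
    intro hk
    have hkn : k < n := by omega
    obtain ⟨hlen, hent⟩ := ih (by omega)
    have hgk : (g[k]'(by omega)).length = n := hrows _ (List.getElem_mem _)
    have hslen : (altShift (prevL dc (g.take k) (List.replicate n true)) dc).length = n :=
      altShift_length _ n hlen (by omega) dc
    have htake : g.take (k + 1) = g.take k ++ [g[k]'(by omega)] := by
      rw [← List.concat_eq_append]
      exact (List.take_concat_get (by omega)).symm
    rw [htake, prevL_append]
    have hzlen : (List.zipWith (fun a b => a && b) (g[k]'(by omega))
        (altShift (prevL dc (g.take k) (List.replicate n true)) dc)).length = n := by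
      simp [List.length_zipWith, hgk, hslen]
    refine ⟨hzlen, fun c hc => ?_⟩
    rw [show (((k + 1 : Nat) : Int)) - 1 = ((k : Nat) : Int) by push_cast; ring]
    rw [List.getD_eq_getElem _ _ (by omega : c < _), List.getElem_zipWith]
    rw [vloop, if_pos (by constructor <;> [omega; constructor <;> [omega; constructor <;> omega]])]
    congr 1
    · have hcell : gget g (k : Int) (c : Int) = (g[k]'(by omega))[c]'(by rw [hgk]; omega) := by
        unfold gget
        rw [Int.toNat_natCast, Int.toNat_natCast,
          List.getD_eq_getElem _ _ (by omega : k < g.length),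
          List.getD_eq_getElem _ _ (by rw [hgk]; omega)]
      rw [hcell]
    · rw [← List.getD_eq_getElem _ false (by omega : c < _)]
      rw [altShift_getD (prevL dc (g.take k) (List.replicate n true)) n hlen dc hdc c hc]
      by_cases hcd : 0 ≤ (c : Int) + dc ∧ (c : Int) + dc < (n : Int)
      · rw [if_pos hcd]
        have h1 : (((c : Int) + dc).toNat) < n := by omega
        have h2 : ((((c : Int) + dc).toNat : Nat) : Int) = (c : Int) + dc := by omega
        rw [hent _ h1, h2]
      · rw [if_neg hcd]
        rw [vloop]
        rw [if_neg (by omega)]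

lemma vstab (g : List (List Bool)) (n : Nat) (hg : g.length = n)
    (hrows : ∀ row ∈ g, row.length = n) (dc : Int) (hdc : dc = -1 ∨ dc = 0 ∨ dc = 1)
    (r c : Nat) (hr : r < n) (hc : c < n) :
    gget (altSweep g n dc) r c = vloop g n dc ((r : Int) - 1) ((c : Int) + dc) := by
  obtain ⟨hlen, hent⟩ := prevL_invariant g n hg hrows dc hdc r (by omega)
  have hr' : r < g.length := by omega
  unfold gget
  have : (altSweep g n dc).getD ((r : Int)).toNat [] = altShift (prevL dc (g.take r) (List.replicate n true)) dc := by
    rw [altSweep_eq_stabL]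
    simpa using stabL_getD dc g (List.replicate n true) r hr'
  rw [this]
  have hshift := altShift_getD _ n hlen dc hdc c hc
  simp only [Int.toNat_natCast] at hshift ⊢
  rw [hshift]
  by_cases hcd : 0 ≤ (c : Int) + dc ∧ (c : Int) + dc < (n : Int)
  · rw [if_pos hcd]
    have h1 : (((c : Int) + dc).toNat) < n := by omega
    have h2 : ((((c : Int) + dc).toNat : Nat) : Int) = (c : Int) + dc := by omega
    rw [hent _ h1, h2]
  · rw [if_neg hcd]
    rw [vloop, if_neg (by omega)]

-- ---- the reversed sweep gives the downward walk ----
lemma gget_reverse (g : List (List Bool)) (n : Nat) (hg : g.length = n) (nr nc : Int)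
    (h : 0 ≤ nr ∧ nr < (n : Int)) :
    gget g.reverse nr nc = gget g ((n : Int) - 1 - nr) nc := by
  unfold gget
  have h1 : nr.toNat < g.reverse.length := by simp; omega
  have h2 : ((n : Int) - 1 - nr).toNat < g.length := by omega
  rw [List.getD_eq_getElem _ _ h1, List.getD_eq_getElem _ _ h2, List.getElem_reverse]
  congr 2
  omega

lemma vloop_reverse (g : List (List Bool)) (n : Nat) (hg : g.length = n) (dc : Int) :
    ∀ (nr nc : Int), vloop g.reverse n dc nr nc = dloop g n dc ((n : Int) - 1 - nr) nc := by
  have main : ∀ (m : Nat) (nr nc : Int), (nr + 1).toNat ≤ m →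
      vloop g.reverse n dc nr nc = dloop g n dc ((n : Int) - 1 - nr) nc := by
    intro m
    induction m with
    | zero =>
      intro nr nc h
      rw [vloop, if_neg (by omega), dloop, if_neg (by omega)]
    | succ m ih =>
      intro nr nc h
      rw [vloop, dloop]
      by_cases hb : 0 ≤ nr ∧ nr < (n : Int) ∧ 0 ≤ nc ∧ nc < (n : Int)
      · rw [if_pos hb, if_pos (by omega)]
        rw [gget_reverse g n hg nr nc ⟨hb.1, hb.2.1⟩,
          ih (nr - 1) (nc + dc) (by omega),
          show (n : Int) - 1 - (nr - 1) = (n : Int) - 1 - nr + 1 by ring]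
      · rw [if_neg hb, if_neg (by omega)]
  intro nr nc
  exact main (nr + 1).toNat nr nc le_rfl

lemma dstab (g : List (List Bool)) (n : Nat) (hg : g.length = n)
    (hrows : ∀ row ∈ g, row.length = n) (dc : Int) (hdc : dc = -1 ∨ dc = 0 ∨ dc = 1)
    (r c : Nat) (hr : r < n) (hc : c < n) :
    gget ((altSweep g.reverse n dc).reverse) r c = dloop g n dc ((r : Int) + 1) ((c : Int) + dc) := by
  have hrevlen : (altSweep g.reverse n dc).length = n := by
    rw [altSweep_eq_stabL, stabL_length]; simpa using hg
  rw [gget_reverse _ n hrevlen (r : Int) (c : Int) (by constructor <;> omega)]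
  have hr' : ((n : Int) - 1 - (r : Int)) = ((n - 1 - r : Nat) : Int) := by omega
  rw [hr']
  rw [vstab g.reverse n (by simpa using hg) (fun row hrow => hrows row (List.mem_reverse.mp hrow))
    dc hdc (n - 1 - r) c (by omega) hc]
  rw [vloop_reverse g n hg dc]
  congr 1
  omega

-- ---- B's horizontal sweeps ----
lemma hstabL_inv (row : List Bool) (n : Nat) (_hrow : row.length = n) :
    ∀ (k : Nat), k ≤ n →
      ((PySem.List.pyRange 0 (k : Int) 1).foldl
        (fun (st : List Bool × Bool) c =>
          (PySem.List.pySetD st.1 c st.2, PySem.List.pyGetD row c false && st.2))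
        (List.replicate n true, true)).2 = hloopL row n ((k : Int) - 1) ∧
      ((PySem.List.pyRange 0 (k : Int) 1).foldl
        (fun (st : List Bool × Bool) c =>
          (PySem.List.pySetD st.1 c st.2, PySem.List.pyGetD row c false && st.2))
        (List.replicate n true, true)).1.length = n ∧
      ∀ (j : Nat), j < n →
        ((PySem.List.pyRange 0 (k : Int) 1).foldl
          (fun (st : List Bool × Bool) c =>
            (PySem.List.pySetD st.1 c st.2, PySem.List.pyGetD row c false && st.2))
          (List.replicate n true, true)).1.getD j false
          = if j < k then hloopL row n ((j : Int) - 1) else true := by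
  intro k
  induction k with
  | zero =>
    intro hk
    rw [show ((0 : Nat) : Int) = 0 by norm_num, PySem.List.pyRange_one_eq_nil le_rfl]
    refine ⟨by rw [List.foldl_nil, hloopL, if_neg (by omega)], by simp, fun j hj => ?_⟩
    simp [hj]
  | succ k ih =>
    intro hk
    obtain ⟨h2, hlen, hent⟩ := ih (by omega)
    rw [show (((k + 1 : Nat)) : Int) = (k : Int) + 1 by push_cast; ring,
      PySem.List.pyRange_one_succ_right (by omega), List.foldl_append, List.foldl_cons,
      List.foldl_nil]
    refine ⟨?_, ?_, ?_⟩
    · show (PySem.List.pyGetD row (k : Int) false && _) = _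
      rw [h2, show (k : Int) + 1 - 1 = (k : Int) by ring]
      conv_rhs => rw [hloopL]
      rw [if_pos (by constructor <;> omega)]
      simp
    · show (PySem.List.pySetD _ (k : Int) _).length = n
      simp [hlen]
    · intro j hj
      show (PySem.List.pySetD _ (k : Int) _).getD j false = _
      rw [PySem.List.pySetD_natCast,
        List.getD_eq_getElem _ _ (by rw [List.length_set, hlen]; omega), List.getElem_set]
      by_cases hjk : k = j
      · rw [if_pos hjk, h2, if_pos (by omega)]
        subst hjk
        rfl
      · rw [if_neg hjk]
        have hji := hent j hj
        rw [List.getD_eq_getElem _ _ (by rw [hlen]; exact hj)] at hji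
        rw [hji]
        by_cases hlt : j < k
        · rw [if_pos hlt, if_pos (by omega)]
        · rw [if_neg hlt, if_neg (by omega)]

lemma hstabL (row : List Bool) (n : Nat) (hrow : row.length = n) (c : Nat) (hc : c < n) :
    (altSweepRow row n (-1)).getD c false = hloopL row n ((c : Int) - 1) := by
  obtain ⟨-, -, hent⟩ := hstabL_inv row n hrow n le_rfl
  rw [altSweepRow, if_pos (by norm_num)]
  rw [hent c hc, if_pos hc]

lemma hstabR_inv (row : List Bool) (n : Nat) (hrow : row.length = n) :
    ∀ (k : Nat), k ≤ n →
      (((List.range k).map (fun j : Nat => (n : Int) - 1 - (j : Int))).foldl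
        (fun (st : List Bool × Bool) c =>
          (PySem.List.pySetD st.1 c st.2, PySem.List.pyGetD row c false && st.2))
        (List.replicate n true, true)).2 = hloopR row n ((n : Int) - (k : Int)) ∧
      (((List.range k).map (fun j : Nat => (n : Int) - 1 - (j : Int))).foldl
        (fun (st : List Bool × Bool) c =>
          (PySem.List.pySetD st.1 c st.2, PySem.List.pyGetD row c false && st.2))
        (List.replicate n true, true)).1.length = n ∧
      ∀ (j : Nat), j < n →
        (((List.range k).map (fun j : Nat => (n : Int) - 1 - (j : Int))).foldl
          (fun (st : List Bool × Bool) c =>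
            (PySem.List.pySetD st.1 c st.2, PySem.List.pyGetD row c false && st.2))
          (List.replicate n true, true)).1.getD j false
          = if n - k ≤ j then hloopR row n ((j : Int) + 1) else true := by
  intro k
  induction k with
  | zero =>
    intro hk
    refine ⟨by rw [List.range_zero, List.map_nil, List.foldl_nil, hloopR, if_neg (by omega)],
      by simp, fun j hj => ?_⟩
    rw [if_neg (by omega)]
    simp [hj]
  | succ k ih =>
    intro hk
    obtain ⟨h2, hlen, hent⟩ := ih (by omega)
    simp only [List.range_succ, List.map_append, List.map_cons, List.map_nil,
      List.foldl_append, List.foldl_cons, List.foldl_nil]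
    refine ⟨?_, ?_, ?_⟩
    · show (PySem.List.pyGetD row ((n : Int) - 1 - (k : Nat)) false && _) = _
      rw [h2, show (n : Int) - ((k + 1 : Nat) : Int) = (n : Int) - 1 - (k : Nat) by
        push_cast; ring]
      conv_rhs => rw [hloopR]
      rw [if_pos (by constructor <;> omega)]
      rw [PySem.List.pyGetD_eq_getElem _ _ (by omega) (by omega),
        List.getD_eq_getElem _ _ (by omega),
        show (n : Int) - 1 - (k : Nat) + 1 = (n : Int) - (k : Nat) by ring]
    · show (PySem.List.pySetD _ ((n : Int) - 1 - (k : Nat)) _).length = n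
      rw [show (n : Int) - 1 - (k : Nat) = ((n - 1 - k : Nat) : Int) by omega,
        PySem.List.pySetD_natCast]
      simp [hlen]
    · intro j hj
      show (PySem.List.pySetD _ ((n : Int) - 1 - (k : Nat)) _).getD j false = _
      rw [show (n : Int) - 1 - (k : Nat) = ((n - 1 - k : Nat) : Int) by omega,
        PySem.List.pySetD_natCast,
        List.getD_eq_getElem _ _ (by rw [List.length_set, hlen]; omega), List.getElem_set]
      by_cases hjk : n - 1 - k = j
      · rw [if_pos hjk, h2, if_pos (by omega)]
        congr 1
        omega
      · rw [if_neg hjk]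
        have hji := hent j hj
        rw [List.getD_eq_getElem _ _ (by rw [hlen]; exact hj)] at hji
        rw [hji]
        by_cases hle : n - k ≤ j
        · rw [if_pos hle, if_pos (by omega)]
        · rw [if_neg hle, if_neg (by omega)]

lemma hstabR (row : List Bool) (n : Nat) (hrow : row.length = n) (c : Nat) (hc : c < n) :
    (altSweepRow row n 1).getD c false = hloopR row n ((c : Int) + 1) := by
  obtain ⟨-, -, hent⟩ := hstabR_inv row n hrow n le_rfl
  rw [altSweepRow, if_neg (by norm_num)]
  rw [show PySem.List.pyRange ((n : Int) - 1) (-1) (-1)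
      = (List.range n).map (fun j : Nat => (n : Int) - 1 - (j : Int)) by
    rw [PySem.List.pyRange_neg_one,
      show (((n : Int) - 1) - (-1)).toNat = n by omega]]
  rw [hent c hc, if_pos (by omega)]

-- ---- pointwise equality of the two counted conditions, then the counts ----
lemma cond_pointwise (board : List (List Int)) (color : Int)
    (hPre : ∀ row ∈ board, board.length ≤ row.length) (r c : Int)
    (hr : 0 ≤ r ∧ r < (board.length : Int)) (hc : 0 ≤ c ∧ c < (board.length : Int)) :
    ((pvCell board r c = color ∧ pvIsStable board r c color (board.length : Int) = true)
      ↔ (PySem.List.pyGetD (PySem.List.pyGetD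
            (board.map (fun row => PySem.List.slice row none (some (PySem.List.len board)))) r []) c 0 = color ∧
         ((([-1, 0, 1] : List Int).map (fun dc => altSweep (openG board (3 - color)) board.length dc)) ++
          (([-1, 0, 1] : List Int).map (fun dc => (altSweep (openG board (3 - color)).reverse board.length dc).reverse)) ++
          (([-1, 1] : List Int).map (fun dc => (openG board (3 - color)).map (fun row => altSweepRow row board.length dc)))).all
            (fun g => PySem.List.pyGetD (PySem.List.pyGetD g r []) c false) = true)) := by
  obtain ⟨rN, rfl⟩ : ∃ m : Nat, r = (m : Int) := ⟨r.toNat, by omega⟩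
  obtain ⟨cN, rfl⟩ : ∃ m : Nat, c = (m : Int) := ⟨c.toNat, by omega⟩
  have hrN : rN < board.length := by omega
  have hcN : cN < board.length := by omega
  have hOlen : (openG board (3 - color)).length = board.length := openG_length _ _
  have hOrows : ∀ row ∈ openG board (3 - color), row.length = board.length :=
    fun row h => openG_row_length _ _ hPre row h
  have hORowLen : ((openG board (3 - color)).getD rN []).length = board.length := by
    rw [List.getD_eq_getElem _ _ (by omega : rN < _)]
    exact hOrows _ (List.getElem_mem _)
  have e1 : ∀ x : Int, x + -1 = x - 1 := fun x => by ring
  have hcell : PySem.List.pyGetD (PySem.List.pyGetD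
      (board.map (fun row => PySem.List.slice row none (some (PySem.List.len board))))
      (rN : Int) []) (cN : Int) 0 = pvCell board (rN : Int) (cN : Int) := by
    have hrl : board.length ≤ (board[rN]'hrN).length := hPre _ (List.getElem_mem hrN)
    have hGridRow : PySem.List.pyGetD
        (board.map (fun row => PySem.List.slice row none (some (PySem.List.len board))))
        (rN : Int) [] = (board[rN]'hrN).take board.length := by
      rw [PySem.List.pyGetD_eq_getElem _ _ (by omega) (by simp; omega)]
      simp [Int.toNat_natCast, PySem.List.len_eq, PySem.List.slice_to_natCast]
    have hBRow : PySem.List.pyGetD board (rN : Int) [] = board[rN]'hrN := by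
      rw [PySem.List.pyGetD_eq_getElem _ _ (by omega) (by simp; omega)]
      simp
    rw [hGridRow, pvCell, hBRow,
      PySem.List.pyGetD_eq_getElem _ _ (by omega)
        (by simp [List.length_take]; omega),
      PySem.List.pyGetD_eq_getElem _ _ (by omega) (by simp; omega)]
    simp [List.getElem_take]
  have hgg : ∀ (G : List (List Bool)),
      PySem.List.pyGetD (PySem.List.pyGetD G (rN : Int) []) (cN : Int) false
        = gget G (rN : Int) (cN : Int) := by
    intro G
    unfold gget
    simp [PySem.List.pyGetD]
  have hmaprow : ∀ dc : Int,
      gget ((openG board (3 - color)).map (fun row => altSweepRow row board.length dc))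
        (rN : Int) (cN : Int)
      = (altSweepRow ((openG board (3 - color)).getD rN []) board.length dc).getD cN false := by
    intro dc
    unfold gget
    simp only [Int.toNat_natCast]
    have hrow : ((openG board (3 - color)).map
          (fun row => altSweepRow row board.length dc)).getD rN []
        = altSweepRow ((openG board (3 - color)).getD rN []) board.length dc := by
      rw [List.getD_eq_getElem _ _ (by simp [hOlen]; omega), List.getElem_map,
        List.getD_eq_getElem _ _ (show rN < (openG board (3 - color)).length by omega)]
    rw [hrow]
  rw [pvIsStable]
  simp only [List.all_cons, List.all_nil, Bool.and_true, Int.toNat_natCast, List.map_cons,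
    List.map_nil, List.cons_append, List.nil_append, e1, add_zero]
  simp only [hgg, hcell]
  rw [pvStep_up board (3 - color) (-1) hPre (board.length + 1) ((rN : Int) - 1)
        ((cN : Int) - 1) (by omega),
      pvStep_up board (3 - color) 0 hPre (board.length + 1) ((rN : Int) - 1) (cN : Int)
        (by omega),
      pvStep_up board (3 - color) 1 hPre (board.length + 1) ((rN : Int) - 1)
        ((cN : Int) + 1) (by omega),
      pvStep_left board (3 - color) hPre (rN : Int) (by constructor <;> omega)
        (board.length + 1) ((cN : Int) - 1) (by omega),
      pvStep_right board (3 - color) hPre (rN : Int) (by constructor <;> omega)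
        (board.length + 1) ((cN : Int) + 1) (by omega),
      pvStep_down board (3 - color) (-1) hPre (board.length + 1) ((rN : Int) + 1)
        ((cN : Int) - 1) (by omega),
      pvStep_down board (3 - color) 0 hPre (board.length + 1) ((rN : Int) + 1) (cN : Int)
        (by omega),
      pvStep_down board (3 - color) 1 hPre (board.length + 1) ((rN : Int) + 1)
        ((cN : Int) + 1) (by omega)]
  rw [vstab _ _ hOlen hOrows (-1) (by norm_num) rN cN hrN hcN,
      vstab _ _ hOlen hOrows 0 (by norm_num) rN cN hrN hcN,
      vstab _ _ hOlen hOrows 1 (by norm_num) rN cN hrN hcN,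
      dstab _ _ hOlen hOrows (-1) (by norm_num) rN cN hrN hcN,
      dstab _ _ hOlen hOrows 0 (by norm_num) rN cN hrN hcN,
      dstab _ _ hOlen hOrows 1 (by norm_num) rN cN hrN hcN,
      hmaprow (-1), hmaprow 1,
      hstabL _ _ hORowLen cN hcN, hstabR _ _ hORowLen cN hcN]
  simp only [e1, add_zero]
  constructor
  · rintro ⟨h1, h2⟩
    refine ⟨h1, ?_⟩
    simp only [Bool.and_eq_true] at h2 ⊢
    tauto
  · rintro ⟨h1, h2⟩
    refine ⟨h1, ?_⟩
    simp only [Bool.and_eq_true] at h2 ⊢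
    tauto

-- ===== VERDICT (by name: the statement is the Claim_ definition above) =====
theorem count_stable_stones_spec : Claim_equal_count_stable_stones := by
  intro board color hDom hPre
  unfold Spec_count_stable_stones
  simp only [count_stable_stones, count_stable_stones_alt, PySem.List.len_eq]
  have hopn : (board.map (fun row =>
        PySem.List.slice row none (some (PySem.List.len board)))).map
      (fun row => row.map (fun x => decide (x ≠ 0) && decide (x ≠ 3 - color)))
      = openG board (3 - color) := by
    rw [List.map_map]
    rfl
  simp only [PySem.List.len_eq] at hopn
  simp only [hopn]
  apply PySem.List.foldl_congr_mem
  intro acc row hrow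
  apply PySem.List.foldl_congr_mem
  intro acc2 col hcol
  rw [PySem.List.mem_pyRange_one] at hrow hcol
  have hiff := cond_pointwise board color hPre row col ⟨hrow.1, hrow.2⟩ ⟨hcol.1, hcol.2⟩
  simp only [PySem.List.len_eq] at hiff
  split_ifs with h1 h2 h3 <;> first | rfl | (exfalso; tauto)
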